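-- pv_equiv track=rewrite | github.com/mmpfrmvbg/Fabrika2 | factory/legacy/agents_v1.py | _parse_hr_proposals
-- ===== SOURCE A (Python) =====
-- def _parse_hr_proposals(response: str) -> list[dict]:
--     proposals = []
--     current = {}
--     for line in response.split("\n"):
--         line = line.strip()
--         if line.upper().startswith("TARGET_ROLE:"):
--             if current.get("target_role"):
--                 proposals.append(current)
--             current = {"target_role": line.split(":", 1)[1].strip()}
--         elif line.upper().startswith("CHANGE_TYPE:"):
--             current["change_type"] = line.split(":", 1)[1].strip()
--         elif line.upper().startswith("PROPOSED_CHANGE:"):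
--             current["proposed_change"] = line.split(":", 1)[1].strip()
--         elif line.upper().startswith("RATIONALE:"):
--             current["rationale"] = line.split(":", 1)[1].strip()
--     if current.get("target_role"):
--         proposals.append(current)
--     return proposals
-- ===== SOURCE B (Python) =====
-- def _parse_hr_proposals(response: str) -> list[dict]:
--     lines = [ln.strip() for ln in response.split("\n")]
--     # pass 1: cut the lines into blocks, one per TARGET_ROLE line; drop lines before the first
--     blocks = []
--     cur = None
--     for ln in lines:
--         if ln.upper().startswith("TARGET_ROLE:"):
--             if cur is not None:
--                 blocks.append(cur)
--             cur = (ln.split(":", 1)[1].strip(), [])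
--         elif cur is not None:
--             cur[1].append(ln)
--     if cur is not None:
--         blocks.append(cur)
--     # pass 2: one dict per block (last occurrence of a field wins); keep only truthy target_role
--     out = []
--     for role, fields in blocks:
--         d = {"target_role": role}
--         for ln in fields:
--             u = ln.upper()
--             if u.startswith("CHANGE_TYPE:"):
--                 d["change_type"] = ln.split(":", 1)[1].strip()
--             elif u.startswith("PROPOSED_CHANGE:"):
--                 d["proposed_change"] = ln.split(":", 1)[1].strip()
--             elif u.startswith("RATIONALE:"):
--                 d["rationale"] = ln.split(":", 1)[1].strip()
--         if role:
--             out.append(d)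
--     return out
-- ===== Notes on version B (the rewrite author's own statement) =====
-- stated objective: alternative
-- what changed: A's single loop that mutates a current dict and flushes it on each TARGET_ROLE line is replaced by a two-pass decomposition: first segment the stripped lines into TARGET_ROLE-headed blocks (dropping lines before the first header), then build one dict per block (last field occurrence wins) and keep only blocks with a non-empty target_role.
import Mathlib
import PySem

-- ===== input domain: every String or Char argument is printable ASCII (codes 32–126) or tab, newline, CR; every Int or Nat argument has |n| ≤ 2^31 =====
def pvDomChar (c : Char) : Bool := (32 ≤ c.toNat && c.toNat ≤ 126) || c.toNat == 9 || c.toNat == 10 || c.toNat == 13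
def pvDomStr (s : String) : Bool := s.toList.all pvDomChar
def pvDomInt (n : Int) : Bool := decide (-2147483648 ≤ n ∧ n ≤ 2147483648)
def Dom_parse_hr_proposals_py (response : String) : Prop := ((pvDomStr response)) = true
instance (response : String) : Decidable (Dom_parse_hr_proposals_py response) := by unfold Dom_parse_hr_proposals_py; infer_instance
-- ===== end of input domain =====

-- B replaces A's single stateful loop by a two-pass decomposition (segment the lines into
-- TARGET_ROLE blocks, then build one dict per block and keep the truthy ones); objective: alternative.

-- shared helpers (identical split/strip/prefix steps both Pythons perform)
def pvIsKey (pref line : String) : Bool := PySem.Str.startswith (PySem.Str.upper line) pref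

def pvVal (line : String) : String :=
  PySem.Str.strip (((PySem.Str.splitMax? line ":" 1).getD []).getD 1 "")

-- ===== PORT A =====
-- truthiness of current.get("target_role") (None or the empty string are falsy)
def pvTruthy (c : PySem.Dict String String) : Bool :=
  match PySem.Dict.get? c "target_role" with
  | some s => s != ""
  | none => false

def pvAStep (st : List (PySem.Dict String String) × PySem.Dict String String) (line0 : String) :
    List (PySem.Dict String String) × PySem.Dict String String :=
  let line := PySem.Str.strip line0
  if pvIsKey "TARGET_ROLE:" line then
    ((if pvTruthy st.2 then st.1 ++ [st.2] else st.1),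
      PySem.Dict.ofList [("target_role", pvVal line)])
  else if pvIsKey "CHANGE_TYPE:" line then (st.1, PySem.Dict.insert st.2 "change_type" (pvVal line))
  else if pvIsKey "PROPOSED_CHANGE:" line then (st.1, PySem.Dict.insert st.2 "proposed_change" (pvVal line))
  else if pvIsKey "RATIONALE:" line then (st.1, PySem.Dict.insert st.2 "rationale" (pvVal line))
  else st

-- the trailing "if current.get('target_role'): proposals.append(current)"
def pvFlushA (fin : List (PySem.Dict String String) × PySem.Dict String String) :
    List (PySem.Dict String String) :=
  if pvTruthy fin.2 then fin.1 ++ [fin.2] else fin.1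

def parse_hr_proposals_py (response : String) : List (List (String × String)) :=
  (pvFlushA (((PySem.Str.split? response "\n").getD []).foldl pvAStep ([], PySem.Dict.empty))).map
    PySem.Dict.items

-- ===== PORT B =====
-- pass 1: segmentation step (lines already stripped)
def pvSegStep (st : List (String × List String) × Option (String × List String)) (ln : String) :
    List (String × List String) × Option (String × List String) :=
  if pvIsKey "TARGET_ROLE:" ln then
    ((match st.2 with | some b => st.1 ++ [b] | none => st.1), some (pvVal ln, []))
  else
    match st.2 with
    | some b => (st.1, some (b.1, b.2 ++ [ln]))
    | none => st

-- trailing "if cur is not None: blocks.append(cur)"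
def pvClose (st : List (String × List String) × Option (String × List String)) :
    List (String × List String) :=
  match st.2 with
  | some b => st.1 ++ [b]
  | none => st.1

-- pass 2, inner loop body: record a field line (last occurrence wins)
def pvFieldStep (d : PySem.Dict String String) (ln : String) : PySem.Dict String String :=
  if pvIsKey "CHANGE_TYPE:" ln then PySem.Dict.insert d "change_type" (pvVal ln)
  else if pvIsKey "PROPOSED_CHANGE:" ln then PySem.Dict.insert d "proposed_change" (pvVal ln)
  else if pvIsKey "RATIONALE:" ln then PySem.Dict.insert d "rationale" (pvVal ln)
  else d

-- pass 2: one dict per block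
def pvBlockDict (b : String × List String) : PySem.Dict String String :=
  b.2.foldl pvFieldStep (PySem.Dict.ofList [("target_role", b.1)])

-- pass 2: keep the blocks whose role is truthy
def pvEmit (bs : List (String × List String)) : List (PySem.Dict String String) :=
  bs.foldl (fun out b => if b.1 != "" then out ++ [pvBlockDict b] else out) []

def parse_hr_proposals_py_alt (response : String) : List (List (String × String)) :=
  (pvEmit (pvClose
      ((((PySem.Str.split? response "\n").getD []).map PySem.Str.strip).foldl pvSegStep
        ([], none)))).map PySem.Dict.items

-- ===== PRECONDITION & SPEC =====
def Spec_parse_hr_proposals_py (response : String) (out : List (List (String × String))) : Prop := out = parse_hr_proposals_py_alt response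
instance (response : String) (out : List (List (String × String))) : Decidable (Spec_parse_hr_proposals_py response out) := by unfold Spec_parse_hr_proposals_py; infer_instance

-- ===== CLAIM (what is proved, stated in full; the proofs are below) =====
def Claim_equal_parse_hr_proposals_py : Prop := ∀ (response : String), Dom_parse_hr_proposals_py response → Spec_parse_hr_proposals_py response (parse_hr_proposals_py response)

-- ===== LEMMAS AND PROOFS =====

-- invariant tying A's current dict to B's open block
def pvRel (c : PySem.Dict String String) (cur : Option (String × List String)) : Prop :=
  match cur with
  | none => PySem.Dict.get? c "target_role" = none
  | some b => c = pvBlockDict b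

theorem pvEmit_append (bs : List (String × List String)) (b : String × List String) :
    pvEmit (bs ++ [b]) = pvEmit bs ++ (if b.1 != "" then [pvBlockDict b] else []) := by
  simp only [pvEmit, List.foldl_append, List.foldl_cons, List.foldl_nil]
  split <;> simp

theorem pvFieldStep_get_tr (d : PySem.Dict String String) (ln : String) :
    PySem.Dict.get? (pvFieldStep d ln) "target_role" = PySem.Dict.get? d "target_role" := by
  unfold pvFieldStep
  split_ifs <;> simp [PySem.Dict.get?_insert]

theorem pvFold_get_tr (fs : List String) (d : PySem.Dict String String) :
    PySem.Dict.get? (fs.foldl pvFieldStep d) "target_role" = PySem.Dict.get? d "target_role" := by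
  induction fs generalizing d with
  | nil => rfl
  | cons ln rest ih => rw [List.foldl_cons, ih, pvFieldStep_get_tr]

theorem pvBlockDict_get_tr (r : String) (fs : List String) :
    PySem.Dict.get? (pvBlockDict (r, fs)) "target_role" = some r := by
  unfold pvBlockDict
  rw [pvFold_get_tr]
  rfl

theorem pvFlush_eq (ps : List (PySem.Dict String String)) (c : PySem.Dict String String)
    (bs : List (String × List String)) (cur : Option (String × List String))
    (hps : ps = pvEmit bs) (hrel : pvRel c cur) :
    pvFlushA (ps, c) = pvEmit (pvClose (bs, cur)) := by
  cases cur with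
  | none =>
    simp only [pvRel] at hrel
    simp [pvFlushA, pvClose, pvTruthy, hrel, hps]
  | some b =>
    simp only [pvRel] at hrel
    subst hrel
    obtain ⟨r, fs⟩ := b
    simp only [pvClose]
    rw [pvEmit_append, hps]
    simp only [pvFlushA, pvTruthy, pvBlockDict_get_tr]
    split <;> simp_all

theorem pvAStep_tr (st : List (PySem.Dict String String) × PySem.Dict String String)
    (l : String) (h : pvIsKey "TARGET_ROLE:" (PySem.Str.strip l) = true) :
    pvAStep st l = ((if pvTruthy st.2 then st.1 ++ [st.2] else st.1),
      PySem.Dict.ofList [("target_role", pvVal (PySem.Str.strip l))]) := by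
  simp [pvAStep, h]

theorem pvAStep_field (st : List (PySem.Dict String String) × PySem.Dict String String)
    (l : String) (h : pvIsKey "TARGET_ROLE:" (PySem.Str.strip l) = false) :
    pvAStep st l = (st.1, pvFieldStep st.2 (PySem.Str.strip l)) := by
  simp only [pvAStep, pvFieldStep, h]
  split_ifs <;> simp_all

theorem pvMain (lines : List String) (ps : List (PySem.Dict String String))
    (c : PySem.Dict String String) (bs : List (String × List String))
    (cur : Option (String × List String)) (hps : ps = pvEmit bs) (hrel : pvRel c cur) :
    pvFlushA (lines.foldl pvAStep (ps, c))
      = pvEmit (pvClose ((lines.map PySem.Str.strip).foldl pvSegStep (bs, cur))) := by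
  induction lines generalizing ps c bs cur with
  | nil => exact pvFlush_eq ps c bs cur hps hrel
  | cons l rest ih =>
    simp only [List.map_cons, List.foldl_cons]
    by_cases h1 : pvIsKey "TARGET_ROLE:" (PySem.Str.strip l) = true
    · rw [pvAStep_tr _ _ h1]
      have hb : pvSegStep (bs, cur) (PySem.Str.strip l) = (pvClose (bs, cur), some (pvVal (PySem.Str.strip l), [])) := by
        cases cur <;> simp [pvSegStep, pvClose, h1]
      rw [hb]
      exact ih _ _ _ _ (pvFlush_eq ps c bs cur hps hrel) rfl
    · rw [pvAStep_field _ _ (by simpa using h1)]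
      cases cur with
      | none =>
        have hb : pvSegStep (bs, none) (PySem.Str.strip l) = (bs, none) := by
          simp [pvSegStep, h1]
        rw [hb]
        apply ih _ _ _ _ hps
        simp only [pvRel] at hrel ⊢
        rw [pvFieldStep_get_tr]; exact hrel
      | some b =>
        have hb : pvSegStep (bs, some b) (PySem.Str.strip l) = (bs, some (b.1, b.2 ++ [PySem.Str.strip l])) := by
          simp [pvSegStep, h1]
        rw [hb]
        apply ih _ _ _ _ hps
        simp only [pvRel] at hrel ⊢
        rw [hrel]
        simp only [pvBlockDict, List.foldl_append, List.foldl_cons, List.foldl_nil]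

-- ===== VERDICT (by name: the statement is the Claim_ definition above) =====
theorem parse_hr_proposals_py_spec : Claim_equal_parse_hr_proposals_py := by
  intro response _
  show parse_hr_proposals_py response = parse_hr_proposals_py_alt response
  unfold parse_hr_proposals_py parse_hr_proposals_py_alt
  rw [pvMain ((PySem.Str.split? response "\n").getD []) [] PySem.Dict.empty [] none rfl
    (by simp [pvRel, PySem.Dict.get?_empty])]
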